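-- pv_equiv track=rewrite | github.com/andrearobayo15/Tesis_Seguridad_Alimentaria | analisis_pca/scripts/interpretacion_componentes_detallada.py | interpretar_componente
-- ===== SOURCE A (Python) =====
-- def interpretar_componente(pc_name, variables_importantes, categorias):
--     """Generar interpretación conceptual del componente"""
--     interpretaciones_base = {
--         'PC1': "Condiciones socioeconómicas generales y calidad de vida",
--         'PC2': "Educación y desarrollo humano",
--         'PC3': "Condiciones climáticas y ambientales",
--         'PC4': "Seguridad alimentaria y acceso a alimentos",
--         'PC5': "Condiciones de vivienda y servicios básicos",
--         'PC6': "Empleo y condiciones laborales",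
--         'PC7': "Factores económicos y ambientales específicos"
--     }
--
--     # Interpretación más específica basada en variables dominantes
--     if len(variables_importantes) > 0:
--         var_principal = variables_importantes[0]['variable']
--
--         # Ajustar interpretación según variable principal
--         if 'vida_general' in var_principal.lower() or 'salud' in var_principal.lower():
--             return "Bienestar general y percepción de calidad de vida"
--         elif 'educacion' in var_principal.lower() or 'analfabetismo' in var_principal.lower():
--             return "Acceso y calidad educativa"
--         elif 'fies' in var_principal.lower():
--             return "Inseguridad alimentaria y acceso a alimentos"
--         elif any(x in var_principal.lower() for x in ['precipitacion', 'temperatura', 'ndvi']):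
--             return "Condiciones climáticas y ambientales"
--         elif 'vivienda' in var_principal.lower() or 'hacinamiento' in var_principal.lower():
--             return "Condiciones habitacionales y servicios"
--         elif 'empleo' in var_principal.lower() or 'trabajo' in var_principal.lower():
--             return "Condiciones laborales y empleo"
--         elif 'pobreza' in var_principal.lower() or 'ipc' in var_principal.lower():
--             return "Condiciones económicas y monetarias"
--
--     return interpretaciones_base.get(pc_name, "Componente multidimensional")
-- ===== SOURCE B (Python) =====
-- _BASE = {
--     'PC1': "Condiciones socioeconómicas generales y calidad de vida",
--     'PC2': "Educación y desarrollo humano",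
--     'PC3': "Condiciones climáticas y ambientales",
--     'PC4': "Seguridad alimentaria y acceso a alimentos",
--     'PC5': "Condiciones de vivienda y servicios básicos",
--     'PC6': "Empleo y condiciones laborales",
--     'PC7': "Factores económicos y ambientales específicos",
-- }
--
-- # Every keyword with the score (index into _TEXTS) of its category.
-- _KEYWORD_SCORE = [
--     ('vida_general', 0), ('salud', 0),
--     ('educacion', 1), ('analfabetismo', 1),
--     ('fies', 2),
--     ('precipitacion', 3), ('temperatura', 3), ('ndvi', 3),
--     ('vivienda', 4), ('hacinamiento', 4),
--     ('empleo', 5), ('trabajo', 5),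
--     ('pobreza', 6), ('ipc', 6),
-- ]
--
-- _TEXTS = [
--     "Bienestar general y percepción de calidad de vida",
--     "Acceso y calidad educativa",
--     "Inseguridad alimentaria y acceso a alimentos",
--     "Condiciones climáticas y ambientales",
--     "Condiciones habitacionales y servicios",
--     "Condiciones laborales y empleo",
--     "Condiciones económicas y monetarias",
-- ]
--
--
-- def interpretar_componente(pc_name, variables_importantes, categorias):
--     """Score every keyword, then return the best- (lowest-) scoring category."""
--     if variables_importantes:
--         var = variables_importantes[0]['variable'].lower()
--         best = min((p for kw, p in _KEYWORD_SCORE if kw in var), default=None)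
--         if best is not None:
--             return _TEXTS[best]
--     return _BASE.get(pc_name, "Componente multidimensional")
-- ===== Notes on version B (the rewrite author's own statement) =====
-- stated objective: alternative
-- what changed: Replaces the ordered short-circuiting if/elif cascade by exhaustive scoring: every keyword in a flat keyword-to-score list is tested unconditionally, min() with default selects the lowest score, and a texts array is indexed by it; equal to A because the cascade order coincides with the score order.
import Mathlib
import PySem

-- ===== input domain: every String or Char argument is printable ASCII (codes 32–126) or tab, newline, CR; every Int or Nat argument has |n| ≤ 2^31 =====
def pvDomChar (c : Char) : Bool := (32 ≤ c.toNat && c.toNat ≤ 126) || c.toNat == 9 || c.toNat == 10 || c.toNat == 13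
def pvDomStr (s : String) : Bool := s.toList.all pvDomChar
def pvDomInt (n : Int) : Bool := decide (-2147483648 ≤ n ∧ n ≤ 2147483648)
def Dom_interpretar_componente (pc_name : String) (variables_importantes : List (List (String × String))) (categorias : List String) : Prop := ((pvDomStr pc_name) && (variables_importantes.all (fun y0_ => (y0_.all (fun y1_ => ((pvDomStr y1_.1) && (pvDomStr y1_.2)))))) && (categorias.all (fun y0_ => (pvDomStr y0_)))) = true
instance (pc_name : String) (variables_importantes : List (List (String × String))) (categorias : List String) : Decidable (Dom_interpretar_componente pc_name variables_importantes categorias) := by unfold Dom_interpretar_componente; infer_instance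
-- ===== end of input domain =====

-- B replaces A's ordered short-circuit if/elif cascade by exhaustive keyword scoring + argmin over a
-- flat keyword→score list (objective: alternative). Equivalence is about the RETURN value.

-- ===== PORT A =====
def interpBase : PySem.Dict String String := PySem.Dict.mk
  [("PC1", "Condiciones socioeconómicas generales y calidad de vida"),
   ("PC2", "Educación y desarrollo humano"),
   ("PC3", "Condiciones climáticas y ambientales"),
   ("PC4", "Seguridad alimentaria y acceso a alimentos"),
   ("PC5", "Condiciones de vivienda y servicios básicos"),
   ("PC6", "Empleo y condiciones laborales"),
   ("PC7", "Factores económicos y ambientales específicos")]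

def interpretar_componente (pc_name : String) (variables_importantes : List (List (String × String))) (categorias : List String) : String :=
  match variables_importantes with
  | d :: _ =>
    match PySem.Dict.get? (PySem.Dict.mk d) "variable" with
    | some var_principal =>
      if PySem.Str.isIn "vida_general" (PySem.Str.lower var_principal) || PySem.Str.isIn "salud" (PySem.Str.lower var_principal) then
        "Bienestar general y percepción de calidad de vida"
      else if PySem.Str.isIn "educacion" (PySem.Str.lower var_principal) || PySem.Str.isIn "analfabetismo" (PySem.Str.lower var_principal) then
        "Acceso y calidad educativa"
      else if PySem.Str.isIn "fies" (PySem.Str.lower var_principal) then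
        "Inseguridad alimentaria y acceso a alimentos"
      else if ["precipitacion", "temperatura", "ndvi"].any (fun x => PySem.Str.isIn x (PySem.Str.lower var_principal)) then
        "Condiciones climáticas y ambientales"
      else if PySem.Str.isIn "vivienda" (PySem.Str.lower var_principal) || PySem.Str.isIn "hacinamiento" (PySem.Str.lower var_principal) then
        "Condiciones habitacionales y servicios"
      else if PySem.Str.isIn "empleo" (PySem.Str.lower var_principal) || PySem.Str.isIn "trabajo" (PySem.Str.lower var_principal) then
        "Condiciones laborales y empleo"
      else if PySem.Str.isIn "pobreza" (PySem.Str.lower var_principal) || PySem.Str.isIn "ipc" (PySem.Str.lower var_principal) then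
        "Condiciones económicas y monetarias"
      else
        PySem.Dict.getD interpBase pc_name "Componente multidimensional"
    | none => PySem.Dict.getD interpBase pc_name "Componente multidimensional"  -- unreachable under Pre_ (Python raises KeyError)
  | [] => PySem.Dict.getD interpBase pc_name "Componente multidimensional"

-- ===== PORT B =====
-- every keyword with the score (index into interpTexts) of its category  (Source B's _KEYWORD_SCORE)
def keywordScore : List (String × Int) :=
  [("vida_general", 0), ("salud", 0),
   ("educacion", 1), ("analfabetismo", 1),
   ("fies", 2),
   ("precipitacion", 3), ("temperatura", 3), ("ndvi", 3),
   ("vivienda", 4), ("hacinamiento", 4),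
   ("empleo", 5), ("trabajo", 5),
   ("pobreza", 6), ("ipc", 6)]

def interpTexts : List String :=
  ["Bienestar general y percepción de calidad de vida",
   "Acceso y calidad educativa",
   "Inseguridad alimentaria y acceso a alimentos",
   "Condiciones climáticas y ambientales",
   "Condiciones habitacionales y servicios",
   "Condiciones laborales y empleo",
   "Condiciones económicas y monetarias"]

def interpretar_componente_alt (pc_name : String) (variables_importantes : List (List (String × String))) (categorias : List String) : String :=
  match variables_importantes with
  | d :: _ =>
    match PySem.Dict.get? (PySem.Dict.mk d) "variable" with
    | some v0 =>
      let v := PySem.Str.lower v0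
      -- best = min((p for kw, p in _KEYWORD_SCORE if kw in var), default=None)
      match PySem.List.min? ((keywordScore.filter (fun kp => PySem.Str.isIn kp.1 v)).map Prod.snd) (fun p => p) with
      | some best =>
        match PySem.List.pyGet? interpTexts best with
        | some t => t
        | none => ""  -- unreachable: best is a score 0..6, interpTexts has 7 entries
      | none => PySem.Dict.getD interpBase pc_name "Componente multidimensional"
    | none => PySem.Dict.getD interpBase pc_name "Componente multidimensional"  -- unreachable under Pre_
  | [] => PySem.Dict.getD interpBase pc_name "Componente multidimensional"

-- ===== PRECONDITION & SPEC =====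
-- Pre_ excludes only inputs where A raises KeyError: a nonempty variables_importantes whose first dict lacks the key 'variable'.
def Pre_interpretar_componente (pc_name : String) (variables_importantes : List (List (String × String))) (categorias : List String) : Prop :=
  (variables_importantes.head?.all (fun d => (PySem.Dict.get? (PySem.Dict.mk d) "variable").isSome)) = true
instance (pc_name : String) (variables_importantes : List (List (String × String))) (categorias : List String) : Decidable (Pre_interpretar_componente pc_name variables_importantes categorias) := by unfold Pre_interpretar_componente; infer_instance

def pvWitness_interpretar_componente : String × (List (List (String × String))) × List String :=
  ("PC2", [[("variable", "tasa_de_empleo")]], ["econ"])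

def Spec_interpretar_componente (pc_name : String) (variables_importantes : List (List (String × String))) (categorias : List String) (out : String) : Prop := out = interpretar_componente_alt pc_name variables_importantes categorias
instance (pc_name : String) (variables_importantes : List (List (String × String))) (categorias : List String) (out : String) : Decidable (Spec_interpretar_componente pc_name variables_importantes categorias out) := by unfold Spec_interpretar_componente; infer_instance

-- ===== CLAIM (what is proved, stated in full; the proofs are below) =====
def Claim_equal_interpretar_componente : Prop := ∀ (pc_name : String) (variables_importantes : List (List (String × String))) (categorias : List String), Dom_interpretar_componente pc_name variables_importantes categorias → Pre_interpretar_componente pc_name variables_importantes categorias → Spec_interpretar_componente pc_name variables_importantes categorias (interpretar_componente pc_name variables_importantes categorias)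

-- ===== LEMMAS AND PROOFS =====

-- A's cascade with the 14 keyword tests abstracted to booleans, returning the category index (none = fall through)
def cascadeIdx (b1 b2 b3 b4 b5 b6 b7 b8 b9 b10 b11 b12 b13 b14 : Bool) : Option Int :=
  if b1 || b2 then some 0
  else if b3 || b4 then some 1
  else if b5 then some 2
  else if b6 || (b7 || (b8 || false)) then some 3
  else if b9 || b10 then some 4
  else if b11 || b12 then some 5
  else if b13 || b14 then some 6
  else none

theorem filter_map_zip {α β : Type} (f : α → β) (p : α → Bool) (l : List α) :
    (l.filter p).map f
      = ((l.zip (l.map p)).filter (fun x => x.2)).map (fun x => f x.1) := by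
  induction l with
  | nil => rfl
  | cons a t ih =>
    simp only [List.map_cons, List.zip_cons_cons, List.filter_cons]
    cases p a <;> simp [ih]

-- A's string cascade expressed through cascadeIdx and the texts table
theorem cascade_getD (b1 b2 b3 b4 b5 b6 b7 b8 b9 b10 b11 b12 b13 b14 : Bool) (F : String) :
    (if b1 || b2 then "Bienestar general y percepción de calidad de vida"
     else if b3 || b4 then "Acceso y calidad educativa"
     else if b5 then "Inseguridad alimentaria y acceso a alimentos"
     else if b6 || (b7 || (b8 || false)) then "Condiciones climáticas y ambientales"
     else if b9 || b10 then "Condiciones habitacionales y servicios"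
     else if b11 || b12 then "Condiciones laborales y empleo"
     else if b13 || b14 then "Condiciones económicas y monetarias"
     else F)
      = (match cascadeIdx b1 b2 b3 b4 b5 b6 b7 b8 b9 b10 b11 b12 b13 b14 with
         | some best =>
           match PySem.List.pyGet? interpTexts best with
           | some t => t
           | none => ""
         | none => F) := by
  unfold cascadeIdx; split_ifs <;> rfl

-- the cascade's first-match index IS the minimum score over all matched keywords
theorem cascadeIdx_eq_min : ∀ b1 b2 b3 b4 b5 b6 b7 b8 b9 b10 b11 b12 b13 b14 : Bool,
    cascadeIdx b1 b2 b3 b4 b5 b6 b7 b8 b9 b10 b11 b12 b13 b14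
      = PySem.List.min?
          (((keywordScore.zip [b1, b2, b3, b4, b5, b6, b7, b8, b9, b10, b11, b12, b13, b14]).filter
              (fun x => x.2)).map (fun x => x.1.2)) (fun p => p) := by decide

theorem map_keywordScore (V : String) :
    keywordScore.map (fun kp => PySem.Str.isIn kp.1 V)
      = [PySem.Str.isIn "vida_general" V, PySem.Str.isIn "salud" V,
         PySem.Str.isIn "educacion" V, PySem.Str.isIn "analfabetismo" V,
         PySem.Str.isIn "fies" V,
         PySem.Str.isIn "precipitacion" V, PySem.Str.isIn "temperatura" V,
         PySem.Str.isIn "ndvi" V,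
         PySem.Str.isIn "vivienda" V, PySem.Str.isIn "hacinamiento" V,
         PySem.Str.isIn "empleo" V, PySem.Str.isIn "trabajo" V,
         PySem.Str.isIn "pobreza" V, PySem.Str.isIn "ipc" V] := rfl

-- ===== VERDICT (by name: the statement is the Claim_ definition above) =====
theorem interpretar_componente_spec : Claim_equal_interpretar_componente := by
  intro pc vi cats _ _
  unfold Spec_interpretar_componente interpretar_componente interpretar_componente_alt
  cases vi with
  | nil => rfl
  | cons d rest =>
    cases h : PySem.Dict.get? (PySem.Dict.mk d) "variable" with
    | none => simp only [h]
    | some v0 =>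
      simp only [h]
      refine Eq.trans (cascade_getD _ _ _ _ _ _ _ _ _ _ _ _ _ _
        (PySem.Dict.getD interpBase pc "Componente multidimensional")) ?_
      rw [filter_map_zip Prod.snd (fun kp => PySem.Str.isIn kp.1 (PySem.Str.lower v0)) keywordScore,
          map_keywordScore (PySem.Str.lower v0), ← cascadeIdx_eq_min]
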